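-- pv_equiv track=rewrite | github.com/ekvall93/HydraMethod | transformData.py | peptide_parser_pt
-- ===== SOURCE A (Python) =====
-- def peptide_parser_pt(p: str):
--     """
--     >>> p = "-OxM-A-BOT-"
--     >>> [i for i in peptide_parser_pt(p)]
--     ['OxM', 'A', 'BOT']
--     """
--     if p[0] == '(':
--         raise ValueError("sequence starts with '('")
--     n = len(p)
--     i = 0
--     while i < n:
--         if p[i] == "-":
--             j = p[(i + 1):].index('-')
--             offset = i + j + 1
--             yield p[(i + 1):offset]
--             i = offset + 1
--         else:
--             yield p[i]
--             i += 1
-- ===== SOURCE B (Python) =====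
-- def peptide_parser_pt(p: str):
--     """Yield the tokens of a peptide string: single residues, or modification
--     names written between dashes ('-OxM-A' -> 'OxM', 'A')."""
--     if p[0] == '(':
--         raise ValueError("sequence starts with '('")
--     buf = None  # None outside a modification; the name built so far inside one
--     for c in p:
--         if buf is None:
--             if c == '-':
--                 buf = ''
--             else:
--                 yield c
--         else:
--             if c == '-':
--                 yield buf
--                 buf = None
--             else:
--                 buf += c
--     if buf is not None:
--         raise ValueError("unterminated modification")
-- ===== Notes on version B (the rewrite author's own statement) =====
-- stated objective: simpler
-- what changed: Replaced the index-jump while-loop (find the next dash with slice.index and slice the token out) by a single character-by-character pass maintaining an accumulator buffer that is None outside a modification and the token built so far inside one; Pre_ excludes exactly the inputs where A raises (empty string, leading '(', odd number of dashes).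
-- outside the precondition, e.g. on peptide_parser_pt('('): A raises ValueError, B raises ValueError
import Mathlib
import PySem

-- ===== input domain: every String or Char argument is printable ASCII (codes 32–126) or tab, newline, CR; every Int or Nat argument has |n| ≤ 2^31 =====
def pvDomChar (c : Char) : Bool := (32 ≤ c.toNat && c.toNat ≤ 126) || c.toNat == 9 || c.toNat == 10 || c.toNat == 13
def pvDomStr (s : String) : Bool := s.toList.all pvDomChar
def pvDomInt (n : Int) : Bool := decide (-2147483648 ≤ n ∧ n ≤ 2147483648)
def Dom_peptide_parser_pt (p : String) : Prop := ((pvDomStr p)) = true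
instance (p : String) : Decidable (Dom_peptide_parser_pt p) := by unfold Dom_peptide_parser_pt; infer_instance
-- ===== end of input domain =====

-- B replaces A's index-and-slice jumps by one char-by-char pass with an accumulator (objective: simpler).
-- Equivalence is about the returned token list; on every input excluded by Pre_ both Pythons raise.

-- ===== PORT A =====
-- A: while i < n: on '-', find the next '-' in p[i+1:] with .index, yield the slice
-- between the dashes, jump past it; otherwise yield the single character. `.index`
-- failing (Python ValueError), the empty string and a leading '(' are excluded by
-- Pre_; the port returns [] where `.index` would raise.
def pvGoA (cs : List Char) : List String :=
  match cs with
  | [] => []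
  | c :: rest =>
    if c = '-' then
      match PySem.List.index? rest '-' with
      | none => []      -- Python raises ValueError here (outside Pre_)
      | some j => String.ofList (rest.take j) :: pvGoA (rest.drop (j + 1))
    else
      String.ofList [c] :: pvGoA rest
termination_by cs.length
decreasing_by
  · simp only [List.length_cons, List.length_drop]; omega
  · simp only [List.length_cons]; omega

def peptide_parser_pt (p : String) : List String := pvGoA p.toList

-- ===== PORT B =====
-- B: one pass; buf = none outside a modification, some (chars so far) inside one.
-- B raises ValueError if buf is still open at the end (outside Pre_); the port returns [] there.
def pvGoB (cs : List Char) (buf : Option (List Char)) : List String :=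
  match cs, buf with
  | [], none => []
  | [], some _ => []   -- Python raises ValueError here (outside Pre_)
  | c :: rest, none =>
    if c = '-' then pvGoB rest (some [])
    else String.ofList [c] :: pvGoB rest none
  | c :: rest, some b =>
    if c = '-' then String.ofList b :: pvGoB rest none
    else pvGoB rest (some (b ++ [c]))

def peptide_parser_pt_alt (p : String) : List String := pvGoB p.toList none

-- ===== PRECONDITION & SPEC =====
-- Pre_ excludes exactly the inputs where Python A raises: the empty string (IndexError on
-- p[0]), a leading '(' (explicit ValueError) and an odd number of dashes (an unmatched
-- opening dash makes `.index` raise ValueError).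
def Pre_peptide_parser_pt (p : String) : Prop :=
  p ≠ "" ∧ p.toList.head? ≠ some '(' ∧ p.toList.count '-' % 2 = 0
instance (p : String) : Decidable (Pre_peptide_parser_pt p) := by
  unfold Pre_peptide_parser_pt; infer_instance

def pvWitness_peptide_parser_pt : String := "-OxM-A-BOT-"

def Spec_peptide_parser_pt (p : String) (out : List String) : Prop := out = peptide_parser_pt_alt p
instance (p : String) (out : List String) : Decidable (Spec_peptide_parser_pt p out) := by unfold Spec_peptide_parser_pt; infer_instance

-- ===== CLAIM (what is proved, stated in full; the proofs are below) =====
def Claim_equal_peptide_parser_pt : Prop := ∀ (p : String), Dom_peptide_parser_pt p → Pre_peptide_parser_pt p → Spec_peptide_parser_pt p (peptide_parser_pt p)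

-- ===== LEMMAS AND PROOFS =====

-- If no closing dash follows, B accumulates to the end of the input and returns [].
theorem pvGoB_noclose (rest : List Char) (b : List Char) (h : '-' ∉ rest) :
    pvGoB rest (some b) = [] := by
  induction rest generalizing b with
  | nil => simp [pvGoB]
  | cons c cs ih =>
    simp only [List.mem_cons, not_or] at h
    have hc : ¬ c = '-' := fun e => h.1 e.symm
    simp [pvGoB, hc, ih _ h.2]

-- Inside a modification, B consumes up to the first dash and yields buf ++ prefix,
-- matching A's slice between the dashes.
theorem pvGoB_some (rest : List Char) (j : Nat) (b : List Char)
    (h : PySem.List.index? rest '-' = some j) :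
    pvGoB rest (some b) = String.ofList (b ++ rest.take j) :: pvGoB (rest.drop (j + 1)) none := by
  induction rest generalizing j b with
  | nil => simp [PySem.List.index?] at h
  | cons c cs ih =>
    by_cases hc : c = '-'
    · subst hc
      rw [PySem.List.index?_cons_self] at h
      simp only [Option.some.injEq] at h
      subst h
      simp [pvGoB]
    · rw [PySem.List.index?_cons_of_ne cs hc] at h
      cases hj : PySem.List.index? cs '-' with
      | none => rw [hj] at h; simp at h
      | some k =>
        rw [hj] at h
        simp only [Option.map_some, Option.some.injEq] at h
        subst h
        simp [pvGoB, hc, ih k (b ++ [c]) hj]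

-- A and B agree on every character list (both return [] where their Python raises).
theorem pvGoA_eq_pvGoB (cs : List Char) : pvGoA cs = pvGoB cs none := by
  generalize hn : cs.length = n
  induction n using Nat.strong_induction_on generalizing cs with
  | _ n ih =>
    match cs, hn with
    | [], _ => simp [pvGoA, pvGoB]
    | c :: rest, hn =>
      by_cases hc : c = '-'
      · subst hc
        cases hidx : PySem.List.index? rest '-' with
        | none =>
          have hmem : '-' ∉ rest := by
            rw [PySem.List.index?_eq_idxOf?] at hidx
            exact List.idxOf?_eq_none_iff.mp hidx
          rw [PySem.List.index?_eq_idxOf?] at hidx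
          simp [pvGoA, pvGoB, hidx, pvGoB_noclose rest [] hmem]
        | some j =>
          have hlt : (rest.drop (j + 1)).length < n := by
            simp only [List.length_drop]
            simp only [List.length_cons] at hn
            omega
          have ihd := ih (rest.drop (j + 1)).length hlt (rest.drop (j + 1)) rfl
          have hidx' := hidx
          rw [PySem.List.index?_eq_idxOf?] at hidx'
          simp [pvGoA, pvGoB, hidx', pvGoB_some rest j [] hidx, ihd]
      · have hlt : rest.length < n := by
          simp only [List.length_cons] at hn; omega
        have ihr := ih rest.length hlt rest rfl
        simp [pvGoA, pvGoB, hc, ihr]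

-- ===== VERDICT (by name: the statement is the Claim_ definition above) =====
theorem peptide_parser_pt_spec : Claim_equal_peptide_parser_pt := by
  intro p _ _
  unfold Spec_peptide_parser_pt peptide_parser_pt peptide_parser_pt_alt
  exact pvGoA_eq_pvGoB p.toList
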